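-- pv_equiv track=rewrite | github.com/ElisunEli/TestGitHub | Exelentmoed2/Mivhan1.py | sorted_list2
-- ===== SOURCE A (Python) =====
-- def sorted_list2(mylist):
--     goodlist = []
--     for numbers in mylist:
--         if numbers > -1:
--             goodlist.insert(0, numbers)
--         else:
--             goodlist.append(numbers)
--     return goodlist
-- ===== SOURCE B (Python) =====
-- def sorted_list2(mylist):
--     nonneg = []
--     neg = []
--     for n in mylist:
--         if n > -1:
--             nonneg.append(n)
--         else:
--             neg.append(n)
--     return nonneg[::-1] + neg
-- ===== Notes on version B (the rewrite author's own statement) =====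
-- stated objective: faster
-- what changed: Replaced the loop that does insert(0, x) (an O(n) list shift per non-negative element) with a single pass into two buckets followed by one reverse and concatenation.
import Mathlib
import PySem

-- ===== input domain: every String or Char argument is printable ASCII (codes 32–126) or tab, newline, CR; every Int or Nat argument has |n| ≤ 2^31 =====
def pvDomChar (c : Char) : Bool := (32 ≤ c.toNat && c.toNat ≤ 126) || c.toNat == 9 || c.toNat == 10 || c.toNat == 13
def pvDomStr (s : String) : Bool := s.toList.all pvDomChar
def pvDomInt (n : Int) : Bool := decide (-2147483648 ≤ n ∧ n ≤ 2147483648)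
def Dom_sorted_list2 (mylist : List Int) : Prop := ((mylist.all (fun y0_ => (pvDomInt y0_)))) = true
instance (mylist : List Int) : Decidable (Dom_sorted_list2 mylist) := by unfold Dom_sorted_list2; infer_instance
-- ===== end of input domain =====

-- B replaces A's quadratic insert(0, x) loop with one pass into two buckets, then reverse + concat (objective: faster).

-- ===== PORT A =====
-- A: loop over mylist; non-negatives are inserted at position 0, negatives appended at the end.
def sorted_list2 (mylist : List Int) : List Int :=
  mylist.foldl (fun goodlist numbers =>
    if numbers > -1 then numbers :: goodlist else goodlist ++ [numbers]) []

-- ===== PORT B =====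
-- B: one pass appending each element to one of two buckets, then reversed non-negatives ++ negatives.
def sorted_list2_alt (mylist : List Int) : List Int :=
  let buckets := mylist.foldl (fun (st : List Int × List Int) n =>
    if n > -1 then (st.1 ++ [n], st.2) else (st.1, st.2 ++ [n])) ([], [])
  buckets.1.reverse ++ buckets.2

-- ===== PRECONDITION & SPEC =====
def Spec_sorted_list2 (mylist : List Int) (out : List Int) : Prop := out = sorted_list2_alt mylist
instance (mylist : List Int) (out : List Int) : Decidable (Spec_sorted_list2 mylist out) := by unfold Spec_sorted_list2; infer_instance

-- ===== CLAIM =====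
def Claim_equal_sorted_list2 : Prop := ∀ (mylist : List Int), Dom_sorted_list2 mylist → Spec_sorted_list2 mylist (sorted_list2 mylist)

-- ===== LEMMAS AND PROOFS =====
lemma loopA_eq (l : List Int) : ∀ g : List Int,
    l.foldl (fun goodlist numbers =>
      if numbers > -1 then numbers :: goodlist else goodlist ++ [numbers]) g
    = (l.filter (fun n => decide (n > -1))).reverse ++ g ++ l.filter (fun n => !decide (n > -1)) := by
  induction l with
  | nil => intro g; simp
  | cons x xs ih =>
    intro g
    by_cases h : x > -1 <;> simp [List.foldl, h, ih]

lemma loopB_eq (l : List Int) : ∀ p q : List Int,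
    l.foldl (fun (st : List Int × List Int) n =>
      if n > -1 then (st.1 ++ [n], st.2) else (st.1, st.2 ++ [n])) (p, q)
    = (p ++ l.filter (fun n => decide (n > -1)), q ++ l.filter (fun n => !decide (n > -1))) := by
  induction l with
  | nil => intro p q; simp
  | cons x xs ih =>
    intro p q
    by_cases h : x > -1 <;> simp [List.foldl, h, ih]

-- ===== VERDICT =====
theorem sorted_list2_spec : Claim_equal_sorted_list2 := by
  intro mylist _
  unfold Spec_sorted_list2 sorted_list2 sorted_list2_alt
  simp [loopA_eq, loopB_eq]
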